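-- pv_equiv track=rewrite | github.com/luksurious/faster-teaching | tests/test_memoryless_model.py | generate_possible_pairs
-- ===== SOURCE A (Python) =====
-- def generate_possible_pairs(result, max_number_range):
--     possible_pairs = []
--     for i in range(int(result) + 1):
--         pair = (i, int(result) - i)
--         if max(pair[0], pair[1]) > max_number_range:
--             continue
--
--         if pair[0] == pair[1]:
--             continue
--
--         possible_pairs.append(pair)
--     return possible_pairs
-- ===== SOURCE B (Python) =====
-- def generate_possible_pairs(result, max_number_range):
--     # Build only the lower half of the symmetric window and mirror it:
--     # valid first components form an interval symmetric about result/2.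
--     r = int(result)
--     hi = min(r, max_number_range)
--     lower = [(i, r - i) for i in range(r - hi, (r + 1) // 2)]
--     return lower + [(b, a) for (a, b) in reversed(lower)]
-- ===== Notes on version B (the rewrite author's own statement) =====
-- stated objective: faster
-- what changed: B exploits the symmetry of the valid splits about result/2: it builds only the lower half of the symmetric window [result-min(result,max), min(result,max)] with 2*i < result and obtains the upper half as the reversed, component-swapped mirror of that list, instead of A's scan over all result+1 splits with filters.
import Mathlib
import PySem

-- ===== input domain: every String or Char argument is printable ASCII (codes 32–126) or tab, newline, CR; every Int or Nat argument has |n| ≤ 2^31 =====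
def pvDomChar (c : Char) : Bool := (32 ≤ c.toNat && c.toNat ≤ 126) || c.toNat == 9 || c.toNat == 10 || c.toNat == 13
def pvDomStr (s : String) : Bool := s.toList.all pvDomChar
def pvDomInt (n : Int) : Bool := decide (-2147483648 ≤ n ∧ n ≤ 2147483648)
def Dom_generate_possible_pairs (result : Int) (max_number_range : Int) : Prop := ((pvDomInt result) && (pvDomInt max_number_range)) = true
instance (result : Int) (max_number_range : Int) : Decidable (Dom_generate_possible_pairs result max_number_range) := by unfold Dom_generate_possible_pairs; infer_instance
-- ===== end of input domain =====

-- B builds only the lower half of the symmetric valid window and mirrors it; objective: faster (O(min(result, max_number_range)) vs A's O(result)).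

-- ===== PORT A =====
def generate_possible_pairs (result : Int) (max_number_range : Int) : List (Int × Int) :=
  (PySem.List.pyRange 0 (result + 1) 1).foldl
    (fun possible_pairs i =>
      if max i (result - i) > max_number_range then possible_pairs
      else if i = result - i then possible_pairs
      else possible_pairs ++ [(i, result - i)]) []

-- ===== PORT B =====
def generate_possible_pairs_alt (result : Int) (max_number_range : Int) : List (Int × Int) :=
  let hi := min result max_number_range
  let lower := (PySem.List.pyRange (result - hi) (PySem.Int.floordiv (result + 1) 2) 1).map
    (fun i => (i, result - i))
  lower ++ lower.reverse.map (fun p => (p.2, p.1))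

-- ===== PRECONDITION & SPEC =====
def Spec_generate_possible_pairs (result : Int) (max_number_range : Int) (out : List (Int × Int)) : Prop := out = generate_possible_pairs_alt result max_number_range
instance (result : Int) (max_number_range : Int) (out : List (Int × Int)) : Decidable (Spec_generate_possible_pairs result max_number_range out) := by unfold Spec_generate_possible_pairs; infer_instance

-- ===== CLAIM (what is proved, stated in full; the proofs are below) =====
def Claim_equal_generate_possible_pairs : Prop := ∀ (result : Int) (max_number_range : Int), Dom_generate_possible_pairs result max_number_range → Spec_generate_possible_pairs result max_number_range (generate_possible_pairs result max_number_range)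

-- ===== LEMMAS AND PROOFS =====

-- The filtered full range equals B's index list: lower window ++ mirrored lower window.
theorem pv_idx_eq (result M : Int) :
    ((PySem.List.pyRange 0 (result + 1) 1).filter
        (fun i => decide (¬ max i (result - i) > M ∧ ¬ i = result - i)))
    = (PySem.List.pyRange (result - min result M) (PySem.Int.floordiv (result + 1) 2) 1)
      ++ ((PySem.List.pyRange (result - min result M) (PySem.Int.floordiv (result + 1) 2) 1).reverse.map
            (fun j => result - j)) := by
  have hm : PySem.Int.floordiv (result + 1) 2 = (result + 1) / 2 :=
    PySem.Int.floordiv_eq_ediv_of_pos (by norm_num)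
  rw [hm]
  set lo := result - min result M with hlo
  set m := (result + 1) / 2 with hmm
  apply List.Perm.eq_of_pairwise (le := (· < ·))
  · intro a b _ _ h1 h2; omega
  · exact (PySem.List.pairwise_lt_pyRange_one 0 (result + 1)).filter _
  · rw [List.pairwise_append]
    refine ⟨PySem.List.pairwise_lt_pyRange_one lo m, ?_, ?_⟩
    · rw [List.pairwise_map, List.pairwise_reverse]
      exact (PySem.List.pairwise_lt_pyRange_one lo m).imp (fun h => by omega)
    · intro a ha b hb
      rw [PySem.List.mem_pyRange_one] at ha
      simp only [List.mem_map, List.mem_reverse, PySem.List.mem_pyRange_one] at hb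
      obtain ⟨j, hj, rfl⟩ := hb
      omega
  · rw [List.perm_ext_iff_of_nodup
      ((PySem.List.nodup_pyRange_one 0 (result + 1)).filter _)
      ?_]
    · intro i
      simp only [List.mem_filter, List.mem_append, List.mem_map, List.mem_reverse,
        PySem.List.mem_pyRange_one, decide_eq_true_eq]
      constructor
      · rintro ⟨⟨h0, h1⟩, h2, h3⟩
        by_cases hlt : i < m
        · exact Or.inl ⟨by omega, hlt⟩
        · exact Or.inr ⟨result - i, ⟨by omega, by omega⟩, by omega⟩
      · rintro (⟨h0, h1⟩ | ⟨j, ⟨hj0, hj1⟩, rfl⟩) <;> exact ⟨⟨by omega, by omega⟩, by omega, by omega⟩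
    · rw [List.nodup_append]
      refine ⟨PySem.List.nodup_pyRange_one lo m,
        List.Nodup.map (fun a b h => by omega)
          (List.nodup_reverse.mpr (PySem.List.nodup_pyRange_one lo m)), ?_⟩
      intro a ha b hb
      rw [PySem.List.mem_pyRange_one] at ha
      simp only [List.mem_map, List.mem_reverse, PySem.List.mem_pyRange_one] at hb
      obtain ⟨j, hj, rfl⟩ := hb
      omega

-- ===== VERDICT (by name: the statement is the Claim_ definition above) =====
theorem generate_possible_pairs_spec : Claim_equal_generate_possible_pairs := by
  intro result M _
  unfold Spec_generate_possible_pairs generate_possible_pairs generate_possible_pairs_alt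
  have hf : (fun (possible_pairs : List (Int × Int)) (i : Int) =>
      if max i (result - i) > M then possible_pairs
      else if i = result - i then possible_pairs
      else possible_pairs ++ [(i, result - i)])
    = (fun possible_pairs i =>
      if (¬ max i (result - i) > M ∧ ¬ i = result - i) then
        possible_pairs ++ [(i, result - i)] else possible_pairs) := by
    funext acc i
    by_cases h1 : max i (result - i) > M
    · rw [if_pos h1, if_neg (by tauto)]
    · by_cases h2 : i = result - i
      · rw [if_neg h1, if_pos h2, if_neg (by tauto)]
      · rw [if_neg h1, if_neg h2, if_pos ⟨h1, h2⟩]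
  rw [hf, PySem.List.foldl_append_ite, List.nil_append, pv_idx_eq result M]
  simp only [List.map_append, List.map_reverse, List.map_map]
  congr 2
  apply List.map_congr_left
  intro j _
  simp only [Function.comp_apply]
  congr 1
  omega
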